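-- pv_equiv track=rewrite | github.com/Austen0305/CryptoOrchestrator | server_fastapi/services/query_optimizer.py | _calculate_optimization_score
-- ===== SOURCE A (Python) =====
-- from typing import Dict, Optional, Any, List
--
-- def _calculate_optimization_score(suggestions: List[Dict]) -> int:
--     """Calculate optimization score (0-100, higher is better)"""
--     score = 100
--
--     for suggestion in suggestions:
--         if suggestion["type"] == "error":
--             score -= 30
--         elif suggestion["type"] == "warning":
--             score -= 15
--         elif suggestion["type"] == "info":
--             score -= 5
--
--     return max(0, score)
-- ===== SOURCE B (Python) =====
-- def _calculate_optimization_score(suggestions):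
--     """Calculate optimization score (0-100, higher is better)"""
--     types = [s["type"] for s in suggestions]
--     score = (100
--              - 30 * types.count("error")
--              - 15 * types.count("warning")
--              - 5 * types.count("info"))
--     return max(0, score)
-- ===== Notes on version B (the rewrite author's own statement) =====
-- stated objective: simpler
-- what changed: Replaces the per-element branch-and-accumulate loop with a tally: extract the type of each suggestion once, count each penalised type with list.count, and compute the score as one closed-form expression.
import Mathlib
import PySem

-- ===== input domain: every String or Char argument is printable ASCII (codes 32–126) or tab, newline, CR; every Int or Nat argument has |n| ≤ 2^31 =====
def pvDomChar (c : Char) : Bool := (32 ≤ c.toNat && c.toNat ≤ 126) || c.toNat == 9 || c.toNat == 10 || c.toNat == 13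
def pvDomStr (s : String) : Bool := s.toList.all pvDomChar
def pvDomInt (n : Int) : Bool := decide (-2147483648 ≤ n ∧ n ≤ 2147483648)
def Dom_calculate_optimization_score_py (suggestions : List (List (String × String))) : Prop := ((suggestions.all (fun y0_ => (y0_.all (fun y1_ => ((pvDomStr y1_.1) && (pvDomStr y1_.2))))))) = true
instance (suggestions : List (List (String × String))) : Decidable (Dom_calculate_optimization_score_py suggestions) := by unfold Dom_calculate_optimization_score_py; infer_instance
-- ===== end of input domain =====

-- B replaces the branch-and-accumulate loop with per-type counts and one closed-form expression (objective: simpler).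

-- ===== PORT A =====
def calculate_optimization_score_py (suggestions : List (List (String × String))) : Int :=
  max 0 (suggestions.foldl (fun score s =>
    let t := (PySem.Dict.ofList s).getD "type" ""
    if t == "error" then score - 30
    else if t == "warning" then score - 15
    else if t == "info" then score - 5
    else score) 100)

-- ===== PORT B =====
def calculate_optimization_score_py_alt (suggestions : List (List (String × String))) : Int :=
  let types := suggestions.map (fun s => (PySem.Dict.ofList s).getD "type" "")
  max 0 (100 - 30 * (PySem.List.count types "error" : Int)
             - 15 * (PySem.List.count types "warning" : Int)
             - 5 * (PySem.List.count types "info" : Int))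

-- ===== PRECONDITION & SPEC =====
-- Pre_ excludes suggestions missing the "type" key, on which both A and B raise KeyError.
def Pre_calculate_optimization_score_py (suggestions : List (List (String × String))) : Prop :=
  (suggestions.all (fun s => (PySem.Dict.ofList s).contains "type")) = true
instance (suggestions : List (List (String × String))) : Decidable (Pre_calculate_optimization_score_py suggestions) := by unfold Pre_calculate_optimization_score_py; infer_instance
def pvWitness_calculate_optimization_score_py : (List (List (String × String))) :=
  [[("type", "error")], [("type", "info"), ("msg", "x")]]
def Spec_calculate_optimization_score_py (suggestions : List (List (String × String))) (out : Int) : Prop := out = calculate_optimization_score_py_alt suggestions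
instance (suggestions : List (List (String × String))) (out : Int) : Decidable (Spec_calculate_optimization_score_py suggestions out) := by unfold Spec_calculate_optimization_score_py; infer_instance

-- ===== CLAIM (what is proved, stated in full; the proofs are below) =====
def Claim_equal_calculate_optimization_score_py : Prop := ∀ (suggestions : List (List (String × String))), Dom_calculate_optimization_score_py suggestions → Pre_calculate_optimization_score_py suggestions → Spec_calculate_optimization_score_py suggestions (calculate_optimization_score_py suggestions)

-- ===== LEMMAS AND PROOFS =====
lemma loop_eq_counts (l : List (List (String × String))) (score : Int) :
    l.foldl (fun score s =>
      let t := (PySem.Dict.ofList s).getD "type" ""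
      if t == "error" then score - 30
      else if t == "warning" then score - 15
      else if t == "info" then score - 5
      else score) score
    = score
      - 30 * (PySem.List.count (l.map (fun s => (PySem.Dict.ofList s).getD "type" "")) "error" : Int)
      - 15 * (PySem.List.count (l.map (fun s => (PySem.Dict.ofList s).getD "type" "")) "warning" : Int)
      - 5 * (PySem.List.count (l.map (fun s => (PySem.Dict.ofList s).getD "type" "")) "info" : Int) := by
  induction l generalizing score with
  | nil => simp [PySem.List.count_eq]
  | cons s rest ih =>
    simp only [List.foldl_cons, List.map_cons, PySem.List.count_eq, List.count_cons] at *
    by_cases he : ((PySem.Dict.ofList s).getD "type" "") = "error" <;>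
    by_cases hw : ((PySem.Dict.ofList s).getD "type" "") = "warning" <;>
    by_cases hi : ((PySem.Dict.ofList s).getD "type" "") = "info" <;>
    simp_all <;> omega

-- ===== VERDICT (by name: the statement is the Claim_ definition above) =====
theorem calculate_optimization_score_py_spec : Claim_equal_calculate_optimization_score_py := by
  intro suggestions _ _
  unfold Spec_calculate_optimization_score_py calculate_optimization_score_py calculate_optimization_score_py_alt
  rw [loop_eq_counts]
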